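-- pv_equiv track=rewrite | github.com/MindtheMachine/IFCS-Implementation | ifcs_engine.py | _has_copula_superlative
-- ===== SOURCE A (Python) =====
-- def _has_copula_superlative(sentence_lower: str) -> bool:
--     """Check if sentence has copula + superlative (is the best/worst/most)
--
--     Excludes sentences starting with 'this is', 'that is', 'it is' as these
--     are typically explanatory rather than assertive.
--     """
--     # Exclude explanatory constructions
--     if sentence_lower.startswith(('this is', 'that is', 'it is', 'there is', 'here is')):
--         return False
--
--     copula_superlatives = [
--         ' is the best ', ' is the worst ', ' is the most ',
--         ' are the best ', ' are the worst ', ' are the most ',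
--         ' was the best ', ' was the worst ', ' was the most ',
--         ' were the best ', ' were the worst ', ' were the most '
--     ]
--     return any(pattern in sentence_lower for pattern in copula_superlatives)
-- ===== SOURCE B (Python) =====
-- _COPULAS = ("is", "are", "was", "were")
-- _SUPERLATIVES = ("best ", "worst ", "most ")
--
--
-- def _has_copula_superlative(sentence_lower: str) -> bool:
--     if sentence_lower.startswith(('this is', 'that is', 'it is', 'there is', 'here is')):
--         return False
--     s = sentence_lower
--     # single left-to-right scan: at each space, try to parse copula + " the " + superlative + " "
--     for i in range(len(s)):
--         if s[i] != ' ':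
--             continue
--         for cop in _COPULAS:
--             mid = cop + " the "
--             if s.startswith(mid, i + 1):
--                 k = i + 1 + len(mid)
--                 for sup in _SUPERLATIVES:
--                     if s.startswith(sup, k):
--                         return True
--     return False
-- ===== Notes on version B (the rewrite author's own statement) =====
-- stated objective: alternative
-- what changed: Replaces the twelve independent substring-containment scans with a single left-to-right scan that, at each space character, parses a copula word, the article, and a superlative word with its trailing space.
import Mathlib
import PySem

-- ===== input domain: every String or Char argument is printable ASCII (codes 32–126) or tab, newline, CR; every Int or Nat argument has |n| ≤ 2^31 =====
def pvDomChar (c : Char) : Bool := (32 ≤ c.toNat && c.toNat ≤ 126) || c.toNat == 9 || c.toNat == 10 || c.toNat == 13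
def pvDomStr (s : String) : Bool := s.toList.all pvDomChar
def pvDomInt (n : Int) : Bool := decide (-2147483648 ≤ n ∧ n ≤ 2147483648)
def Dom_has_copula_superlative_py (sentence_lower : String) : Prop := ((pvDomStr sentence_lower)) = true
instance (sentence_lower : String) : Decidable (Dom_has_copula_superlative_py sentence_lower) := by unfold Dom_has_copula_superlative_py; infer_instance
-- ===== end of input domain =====

-- B replaces the twelve independent `pattern in sentence` substring scans by a single
-- left-to-right scan that, at each space, parses copula + " the " + superlative + " " (objective: alternative).

-- ===== PORT A =====
def has_copula_superlative_py (sentence_lower : String) : Bool :=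
  if PySem.Str.startswith sentence_lower "this is" || PySem.Str.startswith sentence_lower "that is" ||
     PySem.Str.startswith sentence_lower "it is" || PySem.Str.startswith sentence_lower "there is" ||
     PySem.Str.startswith sentence_lower "here is" then false
  else
    [" is the best ", " is the worst ", " is the most ",
     " are the best ", " are the worst ", " are the most ",
     " was the best ", " was the worst ", " was the most ",
     " were the best ", " were the worst ", " were the most "].any
      (fun pattern => PySem.Str.isIn pattern sentence_lower)

-- ===== PORT B =====
def pvCopulas : List (List Char) := ["is".toList, "are".toList, "was".toList, "were".toList]
def pvSups : List (List Char) := ["best ".toList, "worst ".toList, "most ".toList]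

-- B's inner parse at one position: copula + " the " + superlative-with-trailing-space
def pvMatch (t : List Char) : Bool :=
  pvCopulas.any fun cop =>
    PySem.Chars.startswith t (cop ++ " the ".toList) &&
    pvSups.any fun sup => PySem.Chars.startswith (t.drop (cop.length + 5)) sup

-- B's single scan over the positions of the sentence
def pvScan : List Char → Bool
  | [] => false
  | c :: rest => ((c == ' ') && pvMatch rest) || pvScan rest

def has_copula_superlative_py_alt (sentence_lower : String) : Bool :=
  if PySem.Str.startswith sentence_lower "this is" || PySem.Str.startswith sentence_lower "that is" ||
     PySem.Str.startswith sentence_lower "it is" || PySem.Str.startswith sentence_lower "there is" ||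
     PySem.Str.startswith sentence_lower "here is" then false
  else pvScan sentence_lower.toList

-- ===== PRECONDITION & SPEC =====
def Spec_has_copula_superlative_py (sentence_lower : String) (out : Bool) : Prop := out = has_copula_superlative_py_alt sentence_lower
instance (sentence_lower : String) (out : Bool) : Decidable (Spec_has_copula_superlative_py sentence_lower out) := by unfold Spec_has_copula_superlative_py; infer_instance

-- ===== CLAIM (what is proved, stated in full; the proofs are below) =====
def Claim_equal_has_copula_superlative_py : Prop := ∀ (sentence_lower : String), Dom_has_copula_superlative_py sentence_lower → Spec_has_copula_superlative_py sentence_lower (has_copula_superlative_py sentence_lower)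

-- ===== LEMMAS AND PROOFS =====

-- the patterns B parses, assembled from its pieces
def pvPatterns : List (List Char) :=
  pvCopulas.flatMap fun cop => pvSups.map fun sup => ' ' :: (cop ++ " the ".toList ++ sup)

lemma pv_prefix_append_iff (a b cs : List Char) :
    (a ++ b) <+: cs ↔ a <+: cs ∧ b <+: cs.drop a.length := by
  constructor
  · intro h
    exact ⟨(List.prefix_append a b).trans h, by
      obtain ⟨t, ht⟩ := h
      exact ⟨t, by rw [← ht]; simp⟩⟩
  · rintro ⟨⟨t1, h1⟩, ⟨t2, h2⟩⟩
    refine ⟨t2, ?_⟩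
    rw [← h1] at h2 ⊢
    simp at h2
    simp [h2]

lemma pv_decomp (mid sup : List Char) (c : Char) (rest : List Char) :
    ((' ' :: (mid ++ sup)) <+: (c :: rest)) ↔ (c = ' ' ∧ mid <+: rest ∧ sup <+: rest.drop mid.length) := by
  rw [List.cons_prefix_cons, pv_prefix_append_iff]
  tauto

lemma pv_head_iff (c : Char) (rest : List Char) :
    ((c == ' ') && pvMatch rest) = true ↔ ∃ p ∈ pvPatterns, p <+: (c :: rest) := by
  have h5 : (" the ".toList).length = 5 := by decide
  simp only [pvPatterns, pvMatch, List.mem_flatMap, List.mem_map, List.any_eq_true,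
    Bool.and_eq_true, beq_iff_eq, PySem.Chars.startswith_iff]
  constructor
  · rintro ⟨hc, cop, hcop, hmid, sup, hsup, htail⟩
    refine ⟨' ' :: (cop ++ " the ".toList ++ sup), ⟨cop, hcop, sup, hsup, rfl⟩, ?_⟩
    rw [pv_decomp]
    refine ⟨hc, hmid, ?_⟩
    rwa [List.length_append, h5]
  · rintro ⟨p, ⟨cop, hcop, sup, hsup, rfl⟩, hpre⟩
    rw [pv_decomp] at hpre
    obtain ⟨hc, hmid, htail⟩ := hpre
    rw [List.length_append, h5] at htail
    exact ⟨hc, cop, hcop, hmid, sup, hsup, htail⟩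

lemma pv_patterns_ne_nil : ∀ p ∈ pvPatterns, p ≠ [] := by decide

lemma pv_scan_iff (cs : List Char) :
    pvScan cs = true ↔ ∃ p ∈ pvPatterns, ∃ j, p <+: cs.drop j := by
  induction cs with
  | nil =>
    simp only [pvScan, Bool.false_eq_true, false_iff]
    rintro ⟨p, hp, j, hpre⟩
    simp only [List.drop_nil] at hpre
    exact pv_patterns_ne_nil p hp (List.prefix_nil.mp hpre)
  | cons c rest ih =>
    simp only [pvScan, Bool.or_eq_true, pv_head_iff, ih]
    constructor
    · rintro (⟨p, hp, hpre⟩ | ⟨p, hp, j, hpre⟩)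
      · exact ⟨p, hp, 0, hpre⟩
      · exact ⟨p, hp, j + 1, hpre⟩
    · rintro ⟨p, hp, j, hpre⟩
      cases j with
      | zero => exact Or.inl ⟨p, hp, hpre⟩
      | succ j' => exact Or.inr ⟨p, hp, j', hpre⟩

lemma pv_scan_eq_any (cs : List Char) :
    pvScan cs = pvPatterns.any (fun p => PySem.Chars.isIn p cs) := by
  rw [Bool.eq_iff_iff, pv_scan_iff, List.any_eq_true]
  constructor
  · rintro ⟨p, hp, j, hpre⟩
    exact ⟨p, hp, (PySem.Chars.exists_prefix_drop_iff_isIn p cs).mp ⟨j, hpre⟩⟩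
  · rintro ⟨p, hp, h⟩
    obtain ⟨j, hpre⟩ := (PySem.Chars.exists_prefix_drop_iff_isIn p cs).mpr h
    exact ⟨p, hp, j, hpre⟩

lemma pv_patterns_eq : pvPatterns =
    [" is the best ".toList, " is the worst ".toList, " is the most ".toList,
     " are the best ".toList, " are the worst ".toList, " are the most ".toList,
     " was the best ".toList, " was the worst ".toList, " was the most ".toList,
     " were the best ".toList, " were the worst ".toList, " were the most ".toList] := by decide

-- ===== VERDICT (by name: the statement is the Claim_ definition above) =====
theorem has_copula_superlative_py_spec : Claim_equal_has_copula_superlative_py := by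
  intro s _
  unfold Spec_has_copula_superlative_py has_copula_superlative_py has_copula_superlative_py_alt
  split
  · rfl
  · rw [pv_scan_eq_any, pv_patterns_eq]
    simp [PySem.Str.isIn]
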